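-- pv_equiv track=rewrite | github.com/elvis-gene/coding-practice | binarysearch.com/Swap_Characters_to_Equalize_Strings.py | solve
-- ===== SOURCE A (Python) =====
-- def solve(s, t):
--
--     # The two strings can be equal after swaps if
--     # all characters have an even count
--
--     merge = s+t
--     pairs = {}
--
--     for c in merge:
--         pairs[c] = pairs.get(c,0) + 1
--
--     counts = pairs.values()
--
--     for num in counts:
--         if num % 2 != 0:
--             return False
--
--     return True
-- ===== SOURCE B (Python) =====
-- def solve(s, t):
--     # Single pass: maintain the set of characters seen an odd number of times.
--     odd = set()
--     for c in s + t:
--         if c in odd: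
--             odd.remove(c)
--         else:
--             odd.add(c)
--     return not odd
-- ===== Notes on version B (the rewrite author's own statement) =====
-- stated objective: idiomatic
-- what changed: Replaces the build-a-frequency-dict-then-scan-its-values decomposition by a single pass that toggles each character in a set of odd-count characters and tests emptiness.
import Mathlib
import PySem

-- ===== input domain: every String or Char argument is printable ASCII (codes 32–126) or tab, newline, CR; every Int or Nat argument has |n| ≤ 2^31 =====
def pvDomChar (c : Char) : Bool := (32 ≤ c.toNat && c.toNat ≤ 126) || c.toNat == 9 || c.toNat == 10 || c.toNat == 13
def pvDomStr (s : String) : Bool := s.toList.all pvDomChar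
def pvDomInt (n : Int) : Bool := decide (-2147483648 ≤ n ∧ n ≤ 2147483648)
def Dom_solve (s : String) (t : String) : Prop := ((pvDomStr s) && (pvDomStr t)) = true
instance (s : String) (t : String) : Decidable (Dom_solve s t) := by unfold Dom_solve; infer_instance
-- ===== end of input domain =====

-- B replaces the count-then-scan decomposition by a single pass toggling a set of odd-count
-- characters (idiomatic; same asymptotic cost).

-- ===== PORT A =====
-- the 'for num in counts: if num % 2 != 0: return False' loop, with its early return
def solveLoopA : List Int → Bool
  | [] => true
  | n :: rest => if PySem.Int.mod n 2 ≠ 0 then false else solveLoopA rest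

def solve (s : String) (t : String) : Bool :=
  let merge := s.toList ++ t.toList
  let pairs := merge.foldl (fun (d : PySem.Dict Char Int) c => d.insert c (d.getD c 0 + 1)) PySem.Dict.empty
  solveLoopA pairs.values

-- ===== PORT B =====
def solve_alt (s : String) (t : String) : Bool :=
  let odd := (s.toList ++ t.toList).foldl
    (fun (acc : PySem.Set Char) c => if acc.contains c then PySem.Set.discard acc c else PySem.Set.add acc c)
    PySem.Set.empty
  odd.isEmpty

-- ===== PRECONDITION & SPEC =====
def Spec_solve (s : String) (t : String) (out : Bool) : Prop := out = solve_alt s t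
instance (s : String) (t : String) (out : Bool) : Decidable (Spec_solve s t out) := by unfold Spec_solve; infer_instance

-- ===== CLAIM (what is proved, stated in full; the proofs are below) =====
def Claim_equal_solve : Prop := ∀ (s : String) (t : String), Dom_solve s t → Spec_solve s t (solve s t)

-- ===== LEMMAS AND PROOFS =====

theorem solveLoopA_true_iff (ns : List Int) :
    solveLoopA ns = true ↔ ∀ n ∈ ns, PySem.Int.mod n 2 = 0 := by
  induction ns with
  | nil => simp [solveLoopA]
  | cons n rest ih =>
    simp only [solveLoopA]
    by_cases h : PySem.Int.mod n 2 = 0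
    · rw [if_neg (not_not_intro h), ih]
      constructor
      · intro hall m hm
        rcases List.mem_cons.mp hm with rfl | hm'
        · exact h
        · exact hall m hm'
      · intro hall m hm
        exact hall m (List.mem_cons_of_mem _ hm)
    · rw [if_pos h]
      simp only [Bool.false_eq_true, false_iff, not_forall]
      exact ⟨n, List.mem_cons_self .., h⟩

theorem mod_cast_two (n : Nat) : PySem.Int.mod (n : Int) 2 = 0 ↔ n % 2 = 0 := by
  rw [show (2:Int) = ((2:Nat):Int) by norm_num, PySem.Int.mod_natCast]
  omega

theorem toggle_fold_mem (l : List Char) (acc : List Char) (c : Char) :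
    c ∈ l.foldl (fun (acc : PySem.Set Char) c =>
        if acc.contains c then PySem.Set.discard acc c else PySem.Set.add acc c) acc ↔
      ((c ∈ acc) ↔ l.count c % 2 = 0) := by
  induction l generalizing acc with
  | nil => simp
  | cons x rest ih =>
    rw [List.foldl_cons, ih]
    by_cases hmem : x ∈ acc
    · have hb : PySem.Set.contains acc x = true := by simpa using hmem
      rw [if_pos hb]
      simp only [PySem.Set.mem_discard]
      by_cases hcx : c = x
      · subst hcx
        rw [List.count_cons_self]
        by_cases he : rest.count c % 2 = 0 <;> simp [he, hmem] <;> omega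
      · simp [hcx, Ne.symm hcx]
    · rw [if_neg (by simpa using hmem)]
      simp only [PySem.Set.mem_add]
      by_cases hcx : c = x
      · subst hcx
        rw [List.count_cons_self]
        by_cases he : rest.count c % 2 = 0 <;> simp [he, hmem] <;> omega
      · simp [hcx, Ne.symm hcx]

theorem solve_alt_true_iff (s t : String) :
    solve_alt s t = true ↔ ∀ c : Char, (s.toList ++ t.toList).count c % 2 = 0 := by
  rw [show solve_alt s t = ((s.toList ++ t.toList).foldl
      (fun (acc : PySem.Set Char) c =>
        if acc.contains c then PySem.Set.discard acc c else PySem.Set.add acc c)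
      PySem.Set.empty).isEmpty from rfl]
  rw [List.isEmpty_iff, List.eq_nil_iff_forall_not_mem]
  constructor
  · intro h c
    have hc := h c
    rw [toggle_fold_mem] at hc
    simp [PySem.Set.empty] at hc
    simpa using hc
  · intro h c
    rw [toggle_fold_mem]
    have hc2 := h c
    simp [PySem.Set.empty]
    simpa using hc2

theorem solve_true_iff (s t : String) :
    solve s t = true ↔ ∀ c : Char, (s.toList ++ t.toList).count c % 2 = 0 := by
  rw [show solve s t = solveLoopA ((s.toList ++ t.toList).foldl
      (fun (d : PySem.Dict Char Int) c => d.insert c (d.getD c 0 + 1)) PySem.Dict.empty).values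
      from rfl]
  rw [PySem.Dict.foldl_insert_getD_add_one_eq_counter]
  have hvals : (PySem.Dict.counter (s.toList ++ t.toList)).values =
      (PySem.Set.ofList (s.toList ++ t.toList)).map
        (fun k => ((s.toList ++ t.toList).count k : Int)) := by
    show ((PySem.Dict.counter (s.toList ++ t.toList)).items.map (·.2)) = _
    rw [PySem.Dict.items_counter]
    simp
  rw [hvals, solveLoopA_true_iff]
  constructor
  · intro h c
    by_cases hc : c ∈ (s.toList ++ t.toList)
    · have := h ((s.toList ++ t.toList).count c : Int)
        (List.mem_map_of_mem (by rw [PySem.Set.mem_ofList]; exact hc))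
      exact (mod_cast_two _).mp this
    · rw [List.count_eq_zero_of_not_mem hc]
  · intro h n hn
    obtain ⟨k, _, rfl⟩ := List.mem_map.mp hn
    exact (mod_cast_two _).mpr (h k)

-- ===== VERDICT (by name: the statement is the Claim_ definition above) =====
theorem solve_spec : Claim_equal_solve := by
  intro s t _
  show solve s t = solve_alt s t
  have h := (solve_true_iff s t).trans (solve_alt_true_iff s t).symm
  cases ha : solve s t <;> cases hb : solve_alt s t <;> simp_all
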